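-- pv_equiv track=rewrite | github.com/e-nomem/AdventOfCode | y2022/day_08/solution2.py | visibilityScore
-- ===== SOURCE A (Python) =====
-- def visibilityScore(t, r, c):
--     left = 0
--     top = 0
--     right = 0
--     bottom = 0
--     for i in range(r - 1, -1, -1):
--         left += 1
--         if t[r][c] <= t[i][c]:
--             break
--     for i in range(r + 1, len(t)):
--         right += 1
--         if t[r][c] <= t[i][c]:
--             break
--     for i in range(c - 1, -1, -1):
--         top += 1
--         if t[r][c] <= t[r][i]:
--             break
--     for i in range(c + 1, len(t[r])):
--         bottom += 1
--         if t[r][c] <= t[r][i]: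
--             break
--
--     return left * top * bottom * right
-- ===== SOURCE B (Python) =====
-- def visibilityScore(t, r, c):
--     h = t[r][c]
--     n, m = len(t), len(t[r])
--     up_r, left_r = range(1, r + 1), range(1, c + 1)
--     right_r, down_r = range(1, m - c), range(1, n - r)
--     # collect ALL blocking distances per direction (no early exit); the nearest
--     # blocker is min(...), and with no blocker the whole sightline is visible
--     up = [d for d in up_r if t[r - d][c] >= h]
--     left = [d for d in left_r if t[r][c - d] >= h]
--     right = [d for d in right_r if t[r][c + d] >= h]
--     down = [d for d in down_r if t[r + d][c] >= h]
--     score = 1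
--     for blockers, rng in ((up, up_r), (left, left_r), (right, right_r), (down, down_r)):
--         score *= min(blockers) if blockers else len(rng)
--     return score
-- ===== Notes on version B (the rewrite author's own statement) =====
-- stated objective: alternative
-- what changed: A walks outward in each direction with a counter and breaks at the first blocker; B never early-exits: it collects the full set of blocking distances per direction with filter comprehensions over distance ranges and takes min(blockers) (or the whole range length when none), then folds the four values into a product.
-- outside the precondition, e.g. on visibilityScore([[1, 9], [2, 3, 5], [9, 8], [7]], 1, 1): A returns 1, B raises IndexError
import Mathlib
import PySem

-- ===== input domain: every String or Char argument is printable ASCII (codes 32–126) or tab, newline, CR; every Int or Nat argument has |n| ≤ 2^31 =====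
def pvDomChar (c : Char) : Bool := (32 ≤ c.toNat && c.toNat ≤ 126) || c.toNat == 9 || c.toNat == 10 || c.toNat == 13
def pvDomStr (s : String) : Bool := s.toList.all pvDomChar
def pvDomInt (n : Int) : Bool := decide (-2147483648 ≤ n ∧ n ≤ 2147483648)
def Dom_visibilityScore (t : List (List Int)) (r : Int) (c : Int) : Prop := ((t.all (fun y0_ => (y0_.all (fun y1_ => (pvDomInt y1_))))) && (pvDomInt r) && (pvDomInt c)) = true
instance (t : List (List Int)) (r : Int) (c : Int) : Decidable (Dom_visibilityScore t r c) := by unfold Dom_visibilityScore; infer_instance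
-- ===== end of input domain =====

-- B replaces A's four break-on-first-blocker counter walks by full-range filter
-- comprehensions of all blocking distances per direction, taking min of them (or the whole
-- range length when there is none); an alternative algorithm of the same cost, not faster.


-- ===== PORT A =====
-- t[i] (Python row lookup; the [] default is only reached outside Pre_)
def pvRow (t : List (List Int)) (i : Int) : List Int := (PySem.List.pyGet? t i).getD []
-- t[i][c] (the 0 default is only reached outside Pre_)
def pvCell (t : List (List Int)) (i : Int) (c : Int) : Int := PySem.List.pyGetD (pvRow t i) c 0

-- one of A's loops: 'for i in idxs: cnt += 1; if h <= get(i): break'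
def pvScan (get : Int → Int) (h : Int) : List Int → Int
  | [] => 0
  | i :: rest => if h ≤ get i then 1 else 1 + pvScan get h rest

def visibilityScore (t : List (List Int)) (r : Int) (c : Int) : Int :=
  let h := pvCell t r c
  let left := pvScan (fun i => pvCell t i c) h (PySem.List.pyRange (r - 1) (-1) (-1))
  let right := pvScan (fun i => pvCell t i c) h (PySem.List.pyRange (r + 1) t.length 1)
  let top := pvScan (fun i => pvCell t r i) h (PySem.List.pyRange (c - 1) (-1) (-1))
  let bottom := pvScan (fun i => pvCell t r i) h (PySem.List.pyRange (c + 1) (pvRow t r).length 1)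
  left * top * bottom * right

-- ===== PORT B =====
-- 'min(blockers) if blockers else full' (min on a nonempty list never returns none,
-- so the .getD 0 default is unreachable)
def pvNearest (blockers : List Int) (full : Int) : Int :=
  if blockers.isEmpty then full else (PySem.List.min? blockers (fun x => x)).getD 0

def visibilityScore_alt (t : List (List Int)) (r : Int) (c : Int) : Int :=
  let h := pvCell t r c
  let n : Int := t.length
  let m : Int := (pvRow t r).length
  let upR := PySem.List.pyRange 1 (r + 1) 1
  let leftR := PySem.List.pyRange 1 (c + 1) 1
  let rightR := PySem.List.pyRange 1 (m - c) 1
  let downR := PySem.List.pyRange 1 (n - r) 1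
  let up := upR.filter (fun d => h ≤ pvCell t (r - d) c)
  let left := leftR.filter (fun d => h ≤ pvCell t r (c - d))
  let right := rightR.filter (fun d => h ≤ pvCell t r (c + d))
  let down := downR.filter (fun d => h ≤ pvCell t (r + d) c)
  [(up, upR), (left, leftR), (right, rightR), (down, downR)].foldl
    (fun score p => score * pvNearest p.1 (p.2.length : Int)) 1

-- ===== PRECONDITION & SPEC =====
-- Pre_ admits exactly the index pairs valid (in Python's wrapped sense) for every row of the
-- grid: outside it A raises IndexError, except on ragged grids whose too-short row is shielded
-- by an earlier blocker, where A returns by accident of its early break while B's full-range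
-- comprehension itself raises IndexError there.
def Pre_visibilityScore (t : List (List Int)) (r : Int) (c : Int) : Prop :=
  PySem.Raise.InRange t.length r ∧ ∀ row ∈ t, PySem.Raise.InRange row.length c
instance (t : List (List Int)) (r : Int) (c : Int) : Decidable (Pre_visibilityScore t r c) := by
  unfold Pre_visibilityScore; infer_instance

def pvWitness_visibilityScore : List (List Int) × Int × Int := ([[3, 1], [2, 4]], 1, 0)

def Spec_visibilityScore (t : List (List Int)) (r : Int) (c : Int) (out : Int) : Prop := out = visibilityScore_alt t r c
instance (t : List (List Int)) (r : Int) (c : Int) (out : Int) : Decidable (Spec_visibilityScore t r c out) := by unfold Spec_visibilityScore; infer_instance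

-- ===== CLAIM (what is proved, stated in full; the proofs are below) =====
def Claim_equal_visibilityScore : Prop := ∀ (t : List (List Int)) (r : Int) (c : Int), Dom_visibilityScore t r c → Pre_visibilityScore t r c → Spec_visibilityScore t r c (visibilityScore t r c)

-- ===== LEMMAS AND PROOFS =====

-- A's scan over a mapped index list is a scan of the composed getter.
theorem pvScan_map (get : Int → Int) (h : Int) (σ : Int → Int) (idxs : List Int) :
    pvScan get h (idxs.map σ) = pvScan (fun d => get (σ d)) h idxs := by
  induction idxs with
  | nil => rfl
  | cons i rest ih => simp only [List.map_cons, pvScan, ih]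

-- the backward index range is the distance range mapped through d ↦ r - d
theorem pyRange_down_eq_map (r : Int) :
    PySem.List.pyRange (r - 1) (-1) (-1)
      = (PySem.List.pyRange 1 (r + 1) 1).map (fun d => r - d) := by
  rw [PySem.List.pyRange_neg_one, PySem.List.pyRange_one, List.map_map]
  have h1 : (r - 1 - (-1)).toNat = (r + 1 - 1).toNat := by omega
  rw [h1]
  exact List.map_congr_left (fun k _ => by simp [Function.comp]; omega)

-- the forward index range is the distance range mapped through d ↦ r + d
theorem pyRange_up_eq_map (r n : Int) :
    PySem.List.pyRange (r + 1) n 1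
      = (PySem.List.pyRange 1 (n - r) 1).map (fun d => r + d) := by
  rw [PySem.List.pyRange_one, PySem.List.pyRange_one, List.map_map]
  have h1 : (n - (r + 1)).toNat = (n - r - 1).toNat := by omega
  rw [h1]
  exact List.map_congr_left (fun k _ => by simp [Function.comp]; omega)

theorem foldl_min_const (s : Int) (l : List Int) (hl : ∀ x ∈ l, s ≤ x) :
    l.foldl min s = s := by
  induction l with
  | nil => rfl
  | cons x rest ih =>
      have hx : min s x = s := min_eq_left (hl x (List.mem_cons_self))
      simpa [hx] using ih (fun y hy => hl y (List.mem_cons_of_mem _ hy))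

-- key lemma: min of the filtered consecutive distance range = break-scan position
theorem nearest_eq_scan (get : Int → Int) (h : Int) :
    ∀ (len : Nat) (s : Int),
      pvNearest ((PySem.List.pyRange s (s + (len : Int)) 1).filter (fun d => h ≤ get d))
          (s + (len : Int) - 1)
        = s - 1 + pvScan get h (PySem.List.pyRange s (s + (len : Int)) 1) := by
  intro len
  induction len with
  | zero =>
      intro s
      rw [PySem.List.pyRange_one_eq_nil (by omega)]
      simp [pvNearest, pvScan]
  | succ k ih =>
      intro s
      rw [PySem.List.pyRange_one_cons (by omega : s < s + ((k : Nat) + 1 : Nat))]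
      have hrange : s + ((k : Nat) + 1 : Nat) = (s + 1) + (k : Int) := by push_cast; omega
      rw [List.filter_cons]
      simp only [pvScan]
      by_cases hb : h ≤ get s
      · rw [if_pos (by simpa using hb), if_pos hb]
        have hmem : ∀ x ∈ (PySem.List.pyRange (s + 1) (s + ((k : Nat) + 1 : Nat)) 1).filter
            (fun d => decide (h ≤ get d)), s ≤ x := by
          intro x hx
          have := (PySem.List.mem_pyRange_one.mp (List.mem_of_mem_filter hx)).1
          omega
        rw [pvNearest, if_neg (by simp), PySem.List.min?_id_cons, foldl_min_const s _ hmem,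
            Option.getD_some]
        omega
      · rw [if_neg (by simpa using hb), if_neg hb, hrange]
        rw [ih (s + 1)]
        omega

-- per-direction corollary, backward scan (A goes from r-1 down to 0)
theorem dir_backward (get : Int → Int) (h r : Int) :
    pvNearest ((PySem.List.pyRange 1 (r + 1) 1).filter (fun d => h ≤ get (r - d)))
        (((PySem.List.pyRange 1 (r + 1) 1).length : Int))
      = pvScan get h (PySem.List.pyRange (r - 1) (-1) (-1)) := by
  by_cases hr : 0 ≤ r
  · rw [pyRange_down_eq_map, pvScan_map, PySem.List.length_pyRange_one]
    have hlen : r + 1 = (1 : Int) + (r.toNat : Int) := by omega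
    rw [hlen]
    have key := nearest_eq_scan (fun d => get (r - d)) h r.toNat 1
    have e : ((r + 1 - 1).toNat : Int) = (1 : Int) + (r.toNat : Int) - 1 := by omega
    rw [hlen] at e
    rw [e, key]
    omega
  · rw [PySem.List.pyRange_one_eq_nil (by omega : r + 1 ≤ 1),
        PySem.List.pyRange_neg_one_eq_nil (by omega : r - 1 ≤ -1)]
    simp [pvNearest, pvScan]

-- per-direction corollary, forward scan (A goes from r+1 up to n-1)
theorem dir_forward (get : Int → Int) (h r n : Int) :
    pvNearest ((PySem.List.pyRange 1 (n - r) 1).filter (fun d => h ≤ get (r + d)))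
        (((PySem.List.pyRange 1 (n - r) 1).length : Int))
      = pvScan get h (PySem.List.pyRange (r + 1) n 1) := by
  by_cases hrn : r < n
  · rw [pyRange_up_eq_map, pvScan_map, PySem.List.length_pyRange_one]
    have e0 : (((n - r - 1).toNat : Int)) = n - r - 1 := by omega
    rw [e0]
    have hlen : n - r = (1 : Int) + (((n - r - 1).toNat : Int)) := by omega
    rw [hlen]
    rw [nearest_eq_scan (fun d => get (r + d)) h (n - r - 1).toNat 1]
    omega
  · rw [PySem.List.pyRange_one_eq_nil (by omega : n - r ≤ 1),
        PySem.List.pyRange_one_eq_nil (by omega : n ≤ r + 1)]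
    simp [pvNearest, pvScan]

-- ===== VERDICT (by name: the statement is the Claim_ definition above) =====
theorem visibilityScore_spec : Claim_equal_visibilityScore := by
  intro t r c _ _
  unfold Spec_visibilityScore visibilityScore visibilityScore_alt
  simp only [List.foldl]
  rw [dir_backward (fun i => pvCell t i c) (pvCell t r c) r,
      dir_backward (fun i => pvCell t r i) (pvCell t r c) c,
      dir_forward (fun i => pvCell t r i) (pvCell t r c) c ((pvRow t r).length : Int),
      dir_forward (fun i => pvCell t i c) (pvCell t r c) r (t.length : Int)]
  ring
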